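-- pv_equiv track=rewrite | github.com/microsoft/muzic | relyme/telemelody_en/en_word_utils.py | get_structure_mask
-- ===== SOURCE A (Python) =====
-- PUNC = [',', '.', '?']
--
-- def get_structure_mask(syl_sents_punc:list, _struct):
--     """ 根据字数和结构把每个字附上它所在的结构段落
--     Inputs:
--         syl_sents_punc: ['k_r_ey_z', '@@iy', 'l_ih_t', '@@ax_l', 'th_ih_ng', 'k_ao_l_d', 'l_ah_v', ',']
--         struct: ["v_1 v_2"
--     """
--     punct_idx = [i for i, s in enumerate(syl_sents_punc) if s in PUNC]
--
--     st = 0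
--     strct_mask = []
--     for i, ed in enumerate(punct_idx):
--         strct_mask.append((_struct.split()[i], (ed-st)))
--
--         st = ed+1
--
--     return strct_mask
-- ===== SOURCE B (Python) =====
-- PUNC = [',', '.', '?']
--
-- def get_structure_mask(syl_sents_punc: list, _struct):
--     labels = _struct.split()
--     mask = []
--     idx = 0
--     cnt = 0
--     for s in syl_sents_punc:
--         if s in PUNC:
--             mask.append((labels[idx], cnt))
--             idx += 1
--             cnt = 0
--         else:
--             cnt += 1
--     return mask
-- ===== Notes on version B (the rewrite author's own statement) =====
-- stated objective: simpler
-- what changed: Replaces the precomputed punct-index list and the per-punctuation re-split of _struct with a single pass over syl_sents_punc keeping a running char count, a label index and the split labels computed once.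
import Mathlib
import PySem

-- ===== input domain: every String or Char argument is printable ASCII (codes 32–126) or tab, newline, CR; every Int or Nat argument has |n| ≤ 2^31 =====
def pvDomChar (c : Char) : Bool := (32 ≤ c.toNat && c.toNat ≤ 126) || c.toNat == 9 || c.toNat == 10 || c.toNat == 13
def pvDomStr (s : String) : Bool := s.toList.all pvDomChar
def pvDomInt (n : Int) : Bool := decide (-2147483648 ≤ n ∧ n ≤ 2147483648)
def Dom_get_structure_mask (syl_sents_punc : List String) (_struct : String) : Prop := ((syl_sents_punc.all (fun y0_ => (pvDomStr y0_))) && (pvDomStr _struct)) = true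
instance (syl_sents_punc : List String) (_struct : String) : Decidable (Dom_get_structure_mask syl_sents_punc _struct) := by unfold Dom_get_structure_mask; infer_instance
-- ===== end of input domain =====

-- B replaces A's precomputed punct-index list and per-segment re-split of _struct with one
-- pass over syl_sents_punc keeping a running char count and label index (objective: simpler).

def pvPUNC : List String := [",", ".", "?"]

-- ===== PORT A =====
-- punct_idx = [i for i, s in enumerate(syl_sents_punc) if s in PUNC];
-- then for i, ed in enumerate(punct_idx): append (_struct.split()[i], ed - st); st = ed + 1.
-- _struct.split()[i] is ported as pyGetD with default "" — the default is reachable only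
-- outside Pre_ (where Python raises IndexError).
def get_structure_mask (syl_sents_punc : List String) (_struct : String) : List (String × Int) :=
  let punct_idx : List Int :=
    ((PySem.List.enumerate syl_sents_punc 0).filter (fun p => pvPUNC.contains p.2)).map (fun p => p.1)
  let r := (PySem.List.enumerate punct_idx 0).foldl
    (fun (acc : Int × List (String × Int)) p =>
      (p.2 + 1, acc.2 ++ [(PySem.List.pyGetD (PySem.Str.split₀ _struct) p.1 "", p.2 - acc.1)]))
    (0, [])
  r.2

-- ===== PORT B =====
-- labels = _struct.split(); one pass with state (idx, cnt, mask); labels[idx] again pyGetD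
-- with default "" reachable only outside Pre_.
def get_structure_mask_alt (syl_sents_punc : List String) (_struct : String) : List (String × Int) :=
  let labels := PySem.Str.split₀ _struct
  let r := syl_sents_punc.foldl
    (fun (acc : Int × Int × List (String × Int)) s =>
      if pvPUNC.contains s then
        (acc.1 + 1, 0, acc.2.2 ++ [(PySem.List.pyGetD labels acc.1 "", acc.2.1)])
      else
        (acc.1, acc.2.1 + 1, acc.2.2))
    (0, 0, [])
  r.2.2

-- ===== PRECONDITION & SPEC =====
-- Python A raises IndexError (as does B) iff the input holds more punctuation marks than
-- _struct.split() has words; Pre_ admits exactly the inputs where A returns.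
def Pre_get_structure_mask (syl_sents_punc : List String) (_struct : String) : Prop :=
  (syl_sents_punc.countP (fun s => pvPUNC.contains s)) ≤ (PySem.Str.split₀ _struct).length
instance (syl_sents_punc : List String) (_struct : String) : Decidable (Pre_get_structure_mask syl_sents_punc _struct) := by unfold Pre_get_structure_mask; infer_instance

def pvWitness_get_structure_mask : List String × String := (["ab", ",", "cd", "ef", "."], "v_1 v_2")

def Spec_get_structure_mask (syl_sents_punc : List String) (_struct : String) (out : List (String × Int)) : Prop := out = get_structure_mask_alt syl_sents_punc _struct
instance (syl_sents_punc : List String) (_struct : String) (out : List (String × Int)) : Decidable (Spec_get_structure_mask syl_sents_punc _struct out) := by unfold Spec_get_structure_mask; infer_instance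

-- ===== CLAIM (what is proved, stated in full; the proofs are below) =====
def Claim_equal_get_structure_mask : Prop := ∀ (syl_sents_punc : List String) (_struct : String), Dom_get_structure_mask syl_sents_punc _struct → Pre_get_structure_mask syl_sents_punc _struct → Spec_get_structure_mask syl_sents_punc _struct (get_structure_mask syl_sents_punc _struct)

-- ===== LEMMAS AND PROOFS =====

-- recursive view of A's punct_idx list, with an arbitrary start offset
def pvPidx (n : Int) : List String → List Int
  | [] => []
  | s :: t => if pvPUNC.contains s then n :: pvPidx (n + 1) t else pvPidx (n + 1) t

lemma pvPidx_eq (xs : List String) : ∀ n : Int,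
    ((PySem.List.enumerate xs n).filter (fun p => pvPUNC.contains p.2)).map (fun p => p.1)
      = pvPidx n xs := by
  induction xs with
  | nil => intro n; simp [PySem.List.enumerate_nil, pvPidx]
  | cons x t ih =>
    intro n
    simp only [PySem.List.enumerate_cons, List.filter_cons, pvPidx]
    split_ifs with h
    · simp only [List.map_cons]
      exact congrArg _ (by simpa using ih (n + 1))
    · simpa using ih (n + 1)

-- the core invariant: A's fold over enumerate (pvPidx n xs) k with running st equals
-- B's single pass over xs with state (k, cnt, acc), as long as cnt = n - st.
lemma pvMain (labels : List String) (xs : List String) : ∀ (n k st cnt : Int)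
    (acc : List (String × Int)), cnt = n - st →
    ((PySem.List.enumerate (pvPidx n xs) k).foldl
      (fun (a : Int × List (String × Int)) p =>
        (p.2 + 1, a.2 ++ [(PySem.List.pyGetD labels p.1 "", p.2 - a.1)]))
      (st, acc)).2
    = (xs.foldl
      (fun (a : Int × Int × List (String × Int)) s =>
        if pvPUNC.contains s then
          (a.1 + 1, 0, a.2.2 ++ [(PySem.List.pyGetD labels a.1 "", a.2.1)])
        else
          (a.1, a.2.1 + 1, a.2.2))
      (k, cnt, acc)).2.2 := by
  induction xs with
  | nil => intro n k st cnt acc h; simp [pvPidx, PySem.List.enumerate_nil]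
  | cons x t ih =>
    intro n k st cnt acc h
    simp only [pvPidx, List.foldl_cons]
    by_cases hx : pvPUNC.contains x
    · simp only [hx, if_pos, PySem.List.enumerate_cons, List.foldl_cons]
      rw [h]
      exact ih (n + 1) (k + 1) (n + 1) 0 (acc ++ [(PySem.List.pyGetD labels k "", n - st)]) (by omega)
    · simp only [hx, if_neg, Bool.false_eq_true, not_false_iff]
      rw [show cnt + 1 = (n + 1) - st by omega]
      exact ih (n + 1) k st ((n + 1) - st) acc rfl

-- ===== VERDICT (by name: the statement is the Claim_ definition above) =====
theorem get_structure_mask_spec : Claim_equal_get_structure_mask := by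
  intro xs s _ _
  unfold Spec_get_structure_mask get_structure_mask get_structure_mask_alt
  rw [pvPidx_eq xs 0]
  exact pvMain (PySem.Str.split₀ s) xs 0 0 0 0 [] (by omega)
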